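-- pv_equiv track=rewrite | github.com/titomoes/Projetos-Python-Django | lista08old/ipc/funcoes.py | imprimir_questao2
-- ===== SOURCE A (Python) =====
-- def imprimir_questao2(n):
--     res = ""
--     c = 1
--     for i in range(n + 1):
--         # res += str(i + 1) + "\n"
--         for j in range(i):
--             res += str(j + 1) + " "
--         res += "\n"
--     return res
-- ===== SOURCE B (Python) =====
-- def imprimir_questao2(n):
--     parts = []
--     cur = ""
--     for i in range(n + 1):
--         parts.append(cur + "\n")
--         cur += str(i + 1) + " "
--     return "".join(parts)
-- ===== Notes on version B (the rewrite author's own statement) =====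
-- stated objective: alternative
-- what changed: Replaces the nested inner loop that rebuilds each row from scratch with a single pass carrying the growing row prefix as state, collecting the lines in a list joined once.
import Mathlib
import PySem

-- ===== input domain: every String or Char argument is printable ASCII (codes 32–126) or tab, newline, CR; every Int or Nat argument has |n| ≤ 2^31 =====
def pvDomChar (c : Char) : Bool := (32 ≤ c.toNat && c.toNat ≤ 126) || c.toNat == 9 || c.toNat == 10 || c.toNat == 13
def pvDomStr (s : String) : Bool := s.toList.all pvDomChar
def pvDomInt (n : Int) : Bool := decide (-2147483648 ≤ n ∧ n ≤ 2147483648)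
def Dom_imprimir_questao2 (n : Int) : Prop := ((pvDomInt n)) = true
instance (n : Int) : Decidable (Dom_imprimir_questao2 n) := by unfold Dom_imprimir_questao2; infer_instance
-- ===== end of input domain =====

-- B replaces A's nested inner loop (each row rebuilt from scratch) by one pass that carries the
-- growing row prefix as state and joins the collected lines once (objective: alternative).

-- ===== PORT A =====
def imprimir_questao2 (n : Int) : String :=
  (PySem.List.pyRange 0 (n + 1) 1).foldl
    (fun res i =>
      ((PySem.List.pyRange 0 i 1).foldl
        (fun r j => r ++ PySem.Int.toStr (j + 1) ++ " ") res) ++ "\n")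
    ""

-- ===== PORT B =====
def imprimir_questao2_alt (n : Int) : String :=
  String.join
    ((PySem.List.pyRange 0 (n + 1) 1).foldl
      (fun (st : List String × String) i =>
        (st.1 ++ [st.2 ++ "\n"], st.2 ++ PySem.Int.toStr (i + 1) ++ " "))
      ([], "")).1

-- ===== PRECONDITION & SPEC =====
def Spec_imprimir_questao2 (n : Int) (out : String) : Prop := out = imprimir_questao2_alt n
instance (n : Int) (out : String) : Decidable (Spec_imprimir_questao2 n out) := by unfold Spec_imprimir_questao2; infer_instance

-- ===== CLAIM (what is proved, stated in full; the proofs are below) =====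
def Claim_equal_imprimir_questao2 : Prop := ∀ (n : Int), Dom_imprimir_questao2 n → Spec_imprimir_questao2 n (imprimir_questao2 n)

-- ===== LEMMAS AND PROOFS =====

theorem pv_join_foldl_shift (l : List String) : ∀ s : String,
    l.foldl (· ++ ·) s = s ++ l.foldl (· ++ ·) "" := by
  induction l with
  | nil => intro s; simp
  | cons a t ih =>
      intro s
      simp only [List.foldl_cons]
      rw [ih (s ++ a), ih ("" ++ a)]
      simp [String.append_assoc]

theorem pv_join_cons (a : String) (l : List String) :
    String.join (a :: l) = a ++ String.join l := by
  simp only [String.join, List.foldl_cons]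
  rw [pv_join_foldl_shift]
  simp

-- the row prefix "1 2 … i " (A's inner loop from the empty string)
def pvRow (i : Int) : String :=
  (PySem.List.pyRange 0 i 1).foldl (fun r j => r ++ PySem.Int.toStr (j + 1) ++ " ") ""

theorem pv_join_append (l₁ l₂ : List String) :
    String.join (l₁ ++ l₂) = String.join l₁ ++ String.join l₂ := by
  induction l₁ with
  | nil => simp [String.join]
  | cons a t ih =>
      rw [List.cons_append, pv_join_cons, pv_join_cons, ih, String.append_assoc]

theorem pv_inner_shift (L : List Int) : ∀ res : String,
    L.foldl (fun r j => r ++ PySem.Int.toStr (j + 1) ++ " ") res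
      = res ++ L.foldl (fun r j => r ++ PySem.Int.toStr (j + 1) ++ " ") "" := by
  induction L with
  | nil => intro res; simp
  | cons a t ih =>
      intro res
      simp only [List.foldl_cons]
      rw [ih (res ++ PySem.Int.toStr (a + 1) ++ " "),
          ih ("" ++ PySem.Int.toStr (a + 1) ++ " ")]
      simp [String.append_assoc]

theorem pv_invariant (k : Nat) :
    String.join (((PySem.List.pyRange 0 (k : Int) 1).foldl
        (fun (st : List String × String) i =>
          (st.1 ++ [st.2 ++ "\n"], st.2 ++ PySem.Int.toStr (i + 1) ++ " "))
        ([], "")).1)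
      = (PySem.List.pyRange 0 (k : Int) 1).foldl
          (fun res i =>
            ((PySem.List.pyRange 0 i 1).foldl
              (fun r j => r ++ PySem.Int.toStr (j + 1) ++ " ") res) ++ "\n") ""
    ∧ (((PySem.List.pyRange 0 (k : Int) 1).foldl
        (fun (st : List String × String) i =>
          (st.1 ++ [st.2 ++ "\n"], st.2 ++ PySem.Int.toStr (i + 1) ++ " "))
        ([], "")).2) = pvRow (k : Int) := by
  induction k with
  | zero =>
      simp [PySem.List.pyRange_one_eq_nil (by norm_num : (0:Int) ≤ 0), String.join, pvRow]
  | succ k ih =>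
      have hsplit : PySem.List.pyRange 0 ((k + 1 : Nat) : Int) 1
          = PySem.List.pyRange 0 (k : Int) 1 ++ [(k : Int)] := by
        have : ((k + 1 : Nat) : Int) = (k : Int) + 1 := by push_cast; ring
        rw [this, PySem.List.pyRange_one_succ_right (by positivity)]
      obtain ⟨ih1, ih2⟩ := ih
      constructor
      · rw [hsplit, List.foldl_append, List.foldl_append]
        simp only [List.foldl_cons, List.foldl_nil]
        rw [pv_join_append, ih1, ih2,
            pv_inner_shift (PySem.List.pyRange 0 (k : Int) 1)]
        simp [String.join, pvRow, String.append_assoc]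
      · rw [hsplit, List.foldl_append]
        simp only [List.foldl_cons, List.foldl_nil]
        rw [ih2]
        unfold pvRow
        rw [hsplit, List.foldl_append]
        simp

-- ===== VERDICT (by name: the statement is the Claim_ definition above) =====
theorem imprimir_questao2_spec : Claim_equal_imprimir_questao2 := by
  intro n _
  unfold Spec_imprimir_questao2 imprimir_questao2 imprimir_questao2_alt
  by_cases h : n + 1 ≤ 0
  · rw [PySem.List.pyRange_one_eq_nil h]
    simp [String.join]
  · rw [not_le] at h
    have hk : ((n + 1).toNat : Int) = n + 1 := Int.toNat_of_nonneg (by omega)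
    rw [← hk]
    exact (pv_invariant (n + 1).toNat).1.symm
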